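-- pv_equiv track=rewrite | github.com/agespino/surfProject | search/parseInchi.py | getPartnersMissingBonds
-- ===== SOURCE A (Python) =====
-- def getPartnersMissingBonds(toFix, matrix):
--
-- 	partnersLsts = []
--
-- 	for i in range(len(matrix)):
-- 		if i not in toFix:
-- 			partnersLsts.append([])
-- 		else:
-- 			atomRow = matrix[i]
-- 			temp = []
-- 			for j in range(len(atomRow)):
-- 				if atomRow[j] != 0 and j in toFix:
-- 					temp.append(j)
-- 			partnersLsts.append(temp)
-- 	return partnersLsts
-- ===== SOURCE B (Python) =====
-- def getPartnersMissingBonds(toFix, matrix):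
--     n = len(matrix)
--     fix = sorted(set(toFix))
--     result = [[] for _ in range(n)]
--     for i in fix:
--         if 0 <= i < n:
--             row = matrix[i]
--             result[i] = [j for j in fix if 0 <= j < len(row) and row[j] != 0]
--     return result
-- ===== Notes on version B (the rewrite author's own statement) =====
-- stated objective: faster
-- what changed: Instead of scanning the full n-by-n grid with repeated 'in toFix' membership scans, B builds sorted(set(toFix)) once, pre-fills the result with empty lists, and fills only the rows/columns indexed by the valid toFix atoms (toFix-by-toFix submatrix).
import Mathlib
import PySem

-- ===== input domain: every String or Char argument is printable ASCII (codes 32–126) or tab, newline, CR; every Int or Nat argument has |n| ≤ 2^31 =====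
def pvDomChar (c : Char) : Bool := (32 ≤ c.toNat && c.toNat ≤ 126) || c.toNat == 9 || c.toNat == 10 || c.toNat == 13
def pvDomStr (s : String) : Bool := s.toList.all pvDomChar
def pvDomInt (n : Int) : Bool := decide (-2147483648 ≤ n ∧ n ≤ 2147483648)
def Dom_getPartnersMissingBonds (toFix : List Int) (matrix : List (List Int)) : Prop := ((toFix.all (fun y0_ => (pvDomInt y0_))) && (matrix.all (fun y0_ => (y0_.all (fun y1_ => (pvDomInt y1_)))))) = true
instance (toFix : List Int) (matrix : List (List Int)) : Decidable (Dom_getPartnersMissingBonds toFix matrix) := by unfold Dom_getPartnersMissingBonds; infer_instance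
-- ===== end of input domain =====

-- B only scans the sorted deduped toFix indices (the toFix×toFix submatrix) instead of the
-- full n×n grid with membership tests; same return value (neither version mutates an argument).

-- ===== PORT A =====
def getPartnersMissingBonds (toFix : List Int) (matrix : List (List Int)) : List (List Int) :=
  (PySem.List.enumerate matrix).foldl
    (fun partnersLsts p =>
      if ¬ (p.1 ∈ toFix) then
        partnersLsts ++ [[]]
      else
        partnersLsts ++ [(PySem.List.enumerate p.2).foldl
          (fun temp q => if q.2 ≠ 0 ∧ q.1 ∈ toFix then temp ++ [q.1] else temp) []])
    []

-- ===== PORT B =====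
-- fix = sorted(set(toFix))
def pvFixSorted (toFix : List Int) : List Int :=
  PySem.List.sorted (PySem.Set.ofList toFix) (fun x => x)

-- [j for j in fix if 0 <= j < len(row) and row[j] != 0]
def pvRowPartners (fix : List Int) (row : List Int) : List Int :=
  fix.filter (fun j => decide (0 ≤ j) && decide (j < (row.length : Int)) &&
    (PySem.List.pyGetD row j 0 != 0))

def getPartnersMissingBonds_alt (toFix : List Int) (matrix : List (List Int)) : List (List Int) :=
  (pvFixSorted toFix).foldl
    (fun result i =>
      if 0 ≤ i ∧ i < (matrix.length : Int) then
        result.set i.toNat (pvRowPartners (pvFixSorted toFix) (PySem.List.pyGetD matrix i []))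
      else result)
    (List.replicate matrix.length [])

-- ===== PRECONDITION & SPEC =====
def Spec_getPartnersMissingBonds (toFix : List Int) (matrix : List (List Int)) (out : List (List Int)) : Prop := out = getPartnersMissingBonds_alt toFix matrix
instance (toFix : List Int) (matrix : List (List Int)) (out : List (List Int)) : Decidable (Spec_getPartnersMissingBonds toFix matrix out) := by unfold Spec_getPartnersMissingBonds; infer_instance

-- ===== CLAIM (what is proved, stated in full; the proofs are below) =====
def Claim_equal_getPartnersMissingBonds : Prop := ∀ (toFix : List Int) (matrix : List (List Int)), Dom_getPartnersMissingBonds toFix matrix → Spec_getPartnersMissingBonds toFix matrix (getPartnersMissingBonds toFix matrix)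

-- ===== LEMMAS AND PROOFS =====

-- A in map/filter form.
lemma pvA_eq_map (toFix : List Int) (matrix : List (List Int)) :
    getPartnersMissingBonds toFix matrix =
      (PySem.List.enumerate matrix).map
        (fun p => if p.1 ∈ toFix then
            ((PySem.List.enumerate p.2).filter
              (fun q => decide (q.2 ≠ 0 ∧ q.1 ∈ toFix))).map (·.1)
          else []) := by
  unfold getPartnersMissingBonds
  have h : ∀ (acc : List (List Int)) (p : Int × List Int),
      (if ¬ (p.1 ∈ toFix) then acc ++ [[]]
       else acc ++ [(PySem.List.enumerate p.2).foldl
         (fun temp q => if q.2 ≠ 0 ∧ q.1 ∈ toFix then temp ++ [q.1] else temp) []]) =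
      acc ++ [if p.1 ∈ toFix then
          ((PySem.List.enumerate p.2).filter
            (fun q => decide (q.2 ≠ 0 ∧ q.1 ∈ toFix))).map (·.1)
        else []] := by
    intro acc p
    by_cases hp : p.1 ∈ toFix
    · rw [PySem.List.foldl_append_ite (fun q : Int × Int => q.2 ≠ 0 ∧ q.1 ∈ toFix)
        (fun q : Int × Int => q.1)]
      simp [hp]
    · simp [hp]
  rw [PySem.List.foldl_congr_mem (PySem.List.enumerate matrix) _
    (fun acc (p : Int × List Int) => acc ++ [if p.1 ∈ toFix then
        ((PySem.List.enumerate p.2).filter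
          (fun q => decide (q.2 ≠ 0 ∧ q.1 ∈ toFix))).map (·.1)
      else []]) []
    (fun acc x _ => h acc x)]
  rw [PySem.List.foldl_append_singleton_eq_map, List.nil_append]

-- Membership in B's sorted, deduped index list is membership in toFix.
lemma pvMem_fixSorted (toFix : List Int) (x : Int) :
    x ∈ pvFixSorted toFix ↔ x ∈ toFix := by
  unfold pvFixSorted
  rw [List.Perm.mem_iff (PySem.List.sorted_perm (PySem.Set.ofList toFix) (fun x => x) false)]
  exact PySem.Set.mem_ofList toFix x

lemma pvFixSorted_pairwise (toFix : List Int) :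
    (pvFixSorted toFix).Pairwise (· < ·) := by
  unfold pvFixSorted
  exact PySem.List.sorted_ofList_pairwise_lt toFix

-- B's write-at-index loop preserves the result length.
lemma pvSetFold_length (n : Nat) (f : Int → List Int) (l : List Int)
    (init : List (List Int)) :
    (l.foldl (fun res i => if 0 ≤ i ∧ i < (n : Int) then res.set i.toNat (f i) else res)
      init).length = init.length := by
  induction l generalizing init with
  | nil => rfl
  | cons i t ih => simp only [List.foldl_cons]; rw [ih]; split <;> simp

-- B's write-at-index loop, read back elementwise.
lemma pvSetFold_getElem? (n : Nat) (f : Int → List Int) (l : List Int)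
    (init : List (List Int)) (hlen : init.length = n) (k : Nat) (hk : k < n) :
    (l.foldl (fun res i => if 0 ≤ i ∧ i < (n : Int) then res.set i.toNat (f i) else res)
      init)[k]? = if (k : Int) ∈ l then some (f (k : Int)) else init[k]? := by
  induction l generalizing init with
  | nil => simp
  | cons i t ih =>
    simp only [List.foldl_cons]
    rw [ih (init := if 0 ≤ i ∧ i < (n : Int) then init.set i.toNat (f i) else init)
      (by split <;> simp [hlen])]
    by_cases ht : (k : Int) ∈ t
    · simp [ht]
    · by_cases hik : i = (k : Int)
      · subst hik
        have hg : 0 ≤ (k : Int) ∧ (k : Int) < (n : Int) := ⟨by omega, by omega⟩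
        simp [ht, hg, hlen, hk]
      · have hm : ¬ ((k : Int) ∈ i :: t) := by
          simp only [List.mem_cons, not_or]
          exact ⟨fun h => hik h.symm, ht⟩
        rw [if_neg ht, if_neg hm]
        split
        · next hg => simp [show ¬ i.toNat = k from by omega]
        · rfl

-- The inner lists agree: A's range scan with membership tests and B's scan of the
-- sorted fix list are both the strictly increasing enumeration of the same set.
lemma pvInner_eq (toFix : List Int) (row : List Int) :
    ((PySem.List.enumerate row).filter
        (fun q => decide (q.2 ≠ 0 ∧ q.1 ∈ toFix))).map (·.1) =
      pvRowPartners (pvFixSorted toFix) row := by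
  have hpw1 : (((PySem.List.enumerate row).filter
      (fun q => decide (q.2 ≠ 0 ∧ q.1 ∈ toFix))).map (·.1)).Pairwise (· < ·) := by
    refine List.Pairwise.map _ (fun a b h => h) ?_
    exact (PySem.List.pairwise_lt_enumerate row 0).filter _
  have hpw2 : (pvRowPartners (pvFixSorted toFix) row).Pairwise (· < ·) :=
    (pvFixSorted_pairwise toFix).filter _
  have hmem : ∀ x : Int,
      x ∈ ((PySem.List.enumerate row).filter
        (fun q => decide (q.2 ≠ 0 ∧ q.1 ∈ toFix))).map (·.1) ↔
      x ∈ pvRowPartners (pvFixSorted toFix) row := by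
    intro x
    simp only [List.mem_map, List.mem_filter, pvRowPartners, decide_eq_true_eq,
      Bool.and_eq_true, bne_iff_ne, pvMem_fixSorted, PySem.List.mem_enumerate_iff]
    constructor
    · rintro ⟨q, ⟨⟨k, hklt, rfl⟩, hne, hmemf⟩, rfl⟩
      refine ⟨hmemf, ⟨by simp, by simp; omega⟩, ?_⟩
      simpa [PySem.List.pyGetD_natCast, List.getD_eq_getElem?_getD,
        List.getElem?_eq_getElem hklt] using hne
    · rintro ⟨hx, ⟨hx0, hxlt⟩, hne⟩
      have hk : x.toNat < row.length := by omega
      have hgd : PySem.List.pyGetD row x 0 = row[x.toNat] := by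
        have h1 := PySem.List.pyGetD_natCast row x.toNat 0
        rw [show ((x.toNat : Nat) : Int) = x from by omega] at h1
        rw [h1]
        simp [List.getD_eq_getElem?_getD, List.getElem?_eq_getElem hk]
      refine ⟨((0 : Int) + (x.toNat : Int), row[x.toNat]), ⟨⟨x.toNat, hk, rfl⟩, ?_, ?_⟩, ?_⟩
      · show row[x.toNat] ≠ 0
        exact hgd ▸ hne
      · show (0 : Int) + (x.toNat : Int) ∈ toFix
        rw [show (0 : Int) + (x.toNat : Int) = x from by omega]
        exact hx
      · show (0 : Int) + (x.toNat : Int) = x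
        omega
  have hnd1 := hpw1.imp (fun h => ne_of_lt h)
  have hnd2 := hpw2.imp (fun h => ne_of_lt h)
  have hperm := (List.perm_ext_iff_of_nodup hnd1 hnd2).mpr hmem
  have e1 : PySem.List.sorted (pvRowPartners (pvFixSorted toFix) row) (fun x => x) false =
      ((PySem.List.enumerate row).filter
        (fun q => decide (q.2 ≠ 0 ∧ q.1 ∈ toFix))).map (·.1) :=
    PySem.List.sorted_eq_of_perm_of_pairwise_lt _ _ _ hperm hpw1
  have e2 : PySem.List.sorted (pvRowPartners (pvFixSorted toFix) row) (fun x => x) false =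
      pvRowPartners (pvFixSorted toFix) row :=
    PySem.List.sorted_eq_self_of_pairwise _ _ (hpw2.imp (fun h => le_of_lt h))
  exact e1.symm.trans e2

-- ===== VERDICT (by name: the statement is the Claim_ definition above) =====
theorem getPartnersMissingBonds_spec : Claim_equal_getPartnersMissingBonds := by
  intro toFix matrix _
  show getPartnersMissingBonds toFix matrix = getPartnersMissingBonds_alt toFix matrix
  rw [pvA_eq_map]
  unfold getPartnersMissingBonds_alt
  apply List.ext_getElem?
  intro k
  by_cases hk : k < matrix.length
  · rw [pvSetFold_getElem? matrix.length _ (pvFixSorted toFix) _ (by simp) k hk]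
    have hget : PySem.List.pyGetD matrix ((k : Nat) : Int) [] = matrix[k] := by
      rw [PySem.List.pyGetD_natCast]
      simp [List.getD_eq_getElem?_getD, List.getElem?_eq_getElem hk]
    have hA : ((PySem.List.enumerate matrix).map
        (fun p => if p.1 ∈ toFix then
            ((PySem.List.enumerate p.2).filter
              (fun q => decide (q.2 ≠ 0 ∧ q.1 ∈ toFix))).map (·.1)
          else []))[k]? =
        some (if ((k : Nat) : Int) ∈ toFix then
            ((PySem.List.enumerate (matrix[k])).filter
              (fun q => decide (q.2 ≠ 0 ∧ q.1 ∈ toFix))).map (·.1)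
          else []) := by
      rw [List.getElem?_map, PySem.List.getElem?_enumerate]
      simp [List.getElem?_eq_getElem hk]
    rw [hA]
    by_cases hmem : ((k : Nat) : Int) ∈ toFix
    · rw [if_pos hmem, if_pos ((pvMem_fixSorted toFix _).mpr hmem), hget, pvInner_eq]
    · rw [if_neg hmem, if_neg (fun h => hmem ((pvMem_fixSorted toFix _).mp h))]
      simp [hk]
  · have h1 : ((PySem.List.enumerate matrix).map
        (fun p => if p.1 ∈ toFix then
            ((PySem.List.enumerate p.2).filter
              (fun q => decide (q.2 ≠ 0 ∧ q.1 ∈ toFix))).map (·.1)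
          else []))[k]? = none := by
      rw [List.getElem?_eq_none_iff]
      simpa using hk
    rw [h1, eq_comm, List.getElem?_eq_none_iff, pvSetFold_length, List.length_replicate]
    omega
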